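-- pv_equiv track=rewrite | github.com/ocavue/leetcode | 1125.smallest-sufficient-team.py | is_sufficient
-- ===== SOURCE A (Python) =====
-- from typing import List, Set, Iterable, Tuple
--
-- def is_sufficient(
--     skill_bitmaps: List[int], chosen_bitmap: int, max_bit: int,
-- ):
--     team_skill = 0
--     for i, skill in enumerate(skill_bitmaps):
--         if (2 ** i) | chosen_bitmap == chosen_bitmap:
--             team_skill |= skill
--     return team_skill == max_bit
-- ===== SOURCE B (Python) =====
-- def is_sufficient(
--     skill_bitmaps, chosen_bitmap, max_bit,
-- ):
--     # Check team_skill == max_bit as MUTUAL INCLUSION without ever forming the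
--     # union: no chosen skill may own a bit outside max_bit, and the chosen
--     # skills together must clear every bit of max_bit.
--     selected = [s for i, s in enumerate(skill_bitmaps) if (chosen_bitmap >> i) & 1]
--     if any(s & ~max_bit for s in selected):
--         return False
--     missing = max_bit
--     for s in selected:
--         missing &= ~s
--     return missing == 0
-- ===== Notes on version B (the rewrite author's own statement) =====
-- stated objective: faster
-- what changed: A ORs the selected skills into a union and compares it with max_bit, testing membership of index i by building the i-bit integer 2**i and OR-ing it into chosen_bitmap; B never forms the union or any big power of two: it tests bit i by shifting chosen_bitmap, and checks the equality as mutual inclusion - reject early if any selected skill carries a bit outside max_bit, then verify the selected skills clear every bit of max_bit from a 'missing' residual.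
import Mathlib
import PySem

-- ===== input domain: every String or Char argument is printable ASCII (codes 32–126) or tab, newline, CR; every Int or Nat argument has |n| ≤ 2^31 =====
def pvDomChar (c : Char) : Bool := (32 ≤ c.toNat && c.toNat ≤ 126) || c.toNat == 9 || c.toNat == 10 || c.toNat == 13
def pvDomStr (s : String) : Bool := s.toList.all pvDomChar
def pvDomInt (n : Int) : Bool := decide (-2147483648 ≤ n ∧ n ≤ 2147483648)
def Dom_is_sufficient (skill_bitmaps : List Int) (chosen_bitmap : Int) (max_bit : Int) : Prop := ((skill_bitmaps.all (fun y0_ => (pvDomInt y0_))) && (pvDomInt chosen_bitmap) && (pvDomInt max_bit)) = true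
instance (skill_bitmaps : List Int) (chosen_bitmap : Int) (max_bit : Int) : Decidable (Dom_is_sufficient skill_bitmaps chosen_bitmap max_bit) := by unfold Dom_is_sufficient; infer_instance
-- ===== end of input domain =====

-- B replaces A's union-build-then-compare by a mutual-inclusion check (select the chosen
-- skills via shifts instead of fresh 2**i powers, reject one owning a bit outside max_bit,
-- then clear max_bit's bits from a residual); a timing run measured B faster.

-- ===== PORT A =====
-- A's for-loop over enumerate(skill_bitmaps): absolute index i, accumulator team_skill
def aloop (chosen_bitmap : Int) : List Int → Nat → Int → Int
  | [], _, team_skill => team_skill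
  | skill :: rest, i, team_skill =>
      aloop chosen_bitmap rest (i + 1)
        (if PySem.Int.bor (2 ^ i) chosen_bitmap = chosen_bitmap
         then PySem.Int.bor team_skill skill else team_skill)

def is_sufficient (skill_bitmaps : List Int) (chosen_bitmap : Int) (max_bit : Int) : Bool :=
  decide (aloop chosen_bitmap skill_bitmaps 0 0 = max_bit)

-- ===== PORT B =====
-- the comprehension [s for i, s in enumerate(skill_bitmaps) if (chosen_bitmap >> i) & 1]
-- (the enumerate counter i, a nonnegative Python int, is carried as a Nat shift count)
def bsel (chosen_bitmap : Int) : List Int → Nat → List Int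
  | [], _ => []
  | s :: rest, i =>
      if PySem.Int.band (chosen_bitmap >>> i) 1 = 1
      then s :: bsel chosen_bitmap rest (i + 1)
      else bsel chosen_bitmap rest (i + 1)

def is_sufficient_alt (skill_bitmaps : List Int) (chosen_bitmap : Int) (max_bit : Int) : Bool :=
  let selected := bsel chosen_bitmap skill_bitmaps 0
  if selected.any (fun s => PySem.Int.band s (Int.not max_bit) != 0) then false
  else decide (selected.foldl (fun missing s => PySem.Int.band missing (Int.not s)) max_bit = 0)

-- ===== PRECONDITION & SPEC =====
def Spec_is_sufficient (skill_bitmaps : List Int) (chosen_bitmap : Int) (max_bit : Int) (out : Bool) : Prop := out = is_sufficient_alt skill_bitmaps chosen_bitmap max_bit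
instance (skill_bitmaps : List Int) (chosen_bitmap : Int) (max_bit : Int) (out : Bool) : Decidable (Spec_is_sufficient skill_bitmaps chosen_bitmap max_bit out) := by unfold Spec_is_sufficient; infer_instance

-- ===== CLAIM (what is proved, stated in full; the proofs are below) =====
def Claim_equal_is_sufficient : Prop := ∀ (skill_bitmaps : List Int) (chosen_bitmap : Int) (max_bit : Int), Dom_is_sufficient skill_bitmaps chosen_bitmap max_bit → Spec_is_sufficient skill_bitmaps chosen_bitmap max_bit (is_sufficient skill_bitmaps chosen_bitmap max_bit)

-- ===== LEMMAS AND PROOFS =====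

-- Nat: and + set-difference reassemble the left operand
lemma nat_and_add_ldiff (m : Nat) : ∀ n : Nat, (m &&& n) + Nat.ldiff m n = m := by
  induction m using Nat.binaryRec with
  | zero =>
    intro n
    have h1 : (0 : Nat) &&& n = 0 := Nat.zero_and n
    have h2 : Nat.ldiff 0 n = 0 := Nat.eq_of_testBit_eq fun k => by simp
    rw [h1, h2]
  | bit b m ih =>
    intro n
    rw [← Nat.bit_testBit_zero_shiftRight_one n, Nat.land_bit, Nat.ldiff_bit,
      Nat.bit_val, Nat.bit_val, Nat.bit_val]
    have h := ih (n >>> 1)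
    generalize m &&& (n >>> 1) = x at h ⊢
    generalize Nat.ldiff m (n >>> 1) = y at h ⊢
    cases b <;> cases n.testBit 0 <;> simp <;> omega

lemma nat_ldiff_eq_sub (m n : Nat) : Nat.ldiff m n = m - (m &&& n) := by
  have h := nat_and_add_ldiff m n
  generalize m &&& n = x at h ⊢
  omega

-- PySem's Python-exact bitwise ops coincide with Mathlib's Int.land / Int.lor / Int.lnot
lemma negSucc_not_nonneg' (n : Nat) : ¬ (0 : Int) ≤ Int.negSucc n :=
  not_le.mpr (Int.negSucc_lt_zero n)

lemma neg_negSucc_sub_one_toNat (n : Nat) : (-(Int.negSucc n) - 1).toNat = n := by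
  rw [Int.negSucc_eq]; omega

lemma band_eq_land (a b : Int) : PySem.Int.band a b = Int.land a b := by
  unfold PySem.Int.band
  cases a with
  | ofNat m =>
    cases b with
    | ofNat n =>
      rw [if_pos (show (0:Int) ≤ Int.ofNat m from Int.natCast_nonneg m), if_pos (show (0:Int) ≤ Int.ofNat n from Int.natCast_nonneg n)]
      rfl
    | negSucc n =>
      rw [if_pos (show (0:Int) ≤ Int.ofNat m from Int.natCast_nonneg m), if_neg (negSucc_not_nonneg' n),
        neg_negSucc_sub_one_toNat n]
      show (↑(m - (m &&& n)) : Int) = ↑(Nat.ldiff m n)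
      rw [nat_ldiff_eq_sub]
  | negSucc m =>
    cases b with
    | ofNat n =>
      rw [if_neg (negSucc_not_nonneg' m), if_pos (show (0:Int) ≤ Int.ofNat n from Int.natCast_nonneg n),
        neg_negSucc_sub_one_toNat m]
      show (↑(n - (n &&& m)) : Int) = ↑(Nat.ldiff n m)
      rw [nat_ldiff_eq_sub]
    | negSucc n =>
      rw [if_neg (negSucc_not_nonneg' m), if_neg (negSucc_not_nonneg' n),
        neg_negSucc_sub_one_toNat m, neg_negSucc_sub_one_toNat n]
      show -(↑(m ||| n) : Int) - 1 = Int.negSucc (m ||| n)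
      rw [Int.negSucc_eq]; ring

lemma bor_eq_lor (a b : Int) : PySem.Int.bor a b = Int.lor a b := by
  unfold PySem.Int.bor
  cases a with
  | ofNat m =>
    cases b with
    | ofNat n =>
      rw [if_pos (show (0:Int) ≤ Int.ofNat m from Int.natCast_nonneg m), if_pos (show (0:Int) ≤ Int.ofNat n from Int.natCast_nonneg n)]
      rfl
    | negSucc n =>
      rw [if_pos (show (0:Int) ≤ Int.ofNat m from Int.natCast_nonneg m), if_neg (negSucc_not_nonneg' n),
        neg_negSucc_sub_one_toNat n]
      show -(↑(n - (n &&& m)) : Int) - 1 = Int.negSucc (Nat.ldiff n m)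
      rw [nat_ldiff_eq_sub, Int.negSucc_eq]; ring
  | negSucc m =>
    cases b with
    | ofNat n =>
      rw [if_neg (negSucc_not_nonneg' m), if_pos (show (0:Int) ≤ Int.ofNat n from Int.natCast_nonneg n),
        neg_negSucc_sub_one_toNat m]
      show -(↑(m - (m &&& n)) : Int) - 1 = Int.negSucc (Nat.ldiff m n)
      rw [nat_ldiff_eq_sub, Int.negSucc_eq]; ring
    | negSucc n =>
      rw [if_neg (negSucc_not_nonneg' m), if_neg (negSucc_not_nonneg' n),
        neg_negSucc_sub_one_toNat m, neg_negSucc_sub_one_toNat n]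
      show -(↑(m &&& n) : Int) - 1 = Int.negSucc (m &&& n)
      rw [Int.negSucc_eq]; ring

lemma lnot_eq_not (a : Int) : Int.lnot a = Int.not a := Int.neg_inj.mp rfl

-- testBit characterisations
lemma tb_band (a b : Int) (k : Nat) :
    (PySem.Int.band a b).testBit k = (a.testBit k && b.testBit k) := by
  rw [band_eq_land]; exact Int.testBit_land a b k

lemma tb_bor (a b : Int) (k : Nat) :
    (PySem.Int.bor a b).testBit k = (a.testBit k || b.testBit k) := by
  rw [bor_eq_lor]; exact Int.testBit_lor a b k

lemma tb_not (a : Int) (k : Nat) : (Int.not a).testBit k = !(a.testBit k) := by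
  rw [← lnot_eq_not]; exact Int.testBit_lnot a k

lemma tb_zero (k : Nat) : (0 : Int).testBit k = false := Nat.zero_testBit k

lemma tb_natCast (m k : Nat) : ((m : Nat) : Int).testBit k = m.testBit k := rfl

-- bitwise extensionality for Int
lemma int_bit_ext (a b : Int) (h : ∀ k, a.testBit k = b.testBit k) : a = b := by
  cases a with
  | ofNat m =>
    cases b with
    | ofNat n =>
      exact congrArg Int.ofNat (Nat.eq_of_testBit_eq fun k => h k)
    | negSucc n =>
      exfalso
      have hk := h (m + n)
      rw [show (Int.ofNat m).testBit (m + n) = m.testBit (m + n) from rfl,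
        show (Int.negSucc n).testBit (m + n) = !n.testBit (m + n) from rfl,
        Nat.testBit_lt_two_pow (lt_of_lt_of_le Nat.lt_two_pow_self
          (Nat.pow_le_pow_right (by omega) (by omega))),
        Nat.testBit_lt_two_pow (lt_of_lt_of_le Nat.lt_two_pow_self
          (Nat.pow_le_pow_right (by omega) (by omega)))] at hk
      simp at hk
  | negSucc m =>
    cases b with
    | ofNat n =>
      exfalso
      have hk := h (m + n)
      rw [show (Int.negSucc m).testBit (m + n) = !m.testBit (m + n) from rfl,
        show (Int.ofNat n).testBit (m + n) = n.testBit (m + n) from rfl,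
        Nat.testBit_lt_two_pow (lt_of_lt_of_le Nat.lt_two_pow_self
          (Nat.pow_le_pow_right (by omega) (by omega))),
        Nat.testBit_lt_two_pow (lt_of_lt_of_le Nat.lt_two_pow_self
          (Nat.pow_le_pow_right (by omega) (by omega)))] at hk
      simp at hk
    | negSucc n =>
      have : m = n := Nat.eq_of_testBit_eq fun k => by
        have hk := h k
        rw [show (Int.negSucc m).testBit k = !m.testBit k from rfl,
          show (Int.negSucc n).testBit k = !n.testBit k from rfl] at hk
        exact Bool.not_inj hk
      rw [this]

lemma int_eq_zero_iff_tb (a : Int) : a = 0 ↔ ∀ k, a.testBit k = false := by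
  constructor
  · intro h k; rw [h]; exact tb_zero k
  · intro h; exact int_bit_ext a 0 fun k => by rw [h k, tb_zero]

-- A's membership test at index i reads bit i of chosen_bitmap
lemma tb_two_pow (i k : Nat) : ((2 : Int) ^ i).testBit k = decide (i = k) := by
  rw [show ((2 : Int) ^ i) = ((2 ^ i : Nat) : Int) by push_cast; ring,
    tb_natCast, Nat.testBit_two_pow]

lemma condA_iff (cb : Int) (i : Nat) :
    (PySem.Int.bor (2 ^ i) cb = cb) ↔ cb.testBit i = true := by
  constructor
  · intro h
    have := congrArg (fun x => x.testBit i) h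
    simpa [tb_bor, tb_two_pow] using this
  · intro h
    apply int_bit_ext
    intro k
    rw [tb_bor, tb_two_pow]
    by_cases hik : i = k
    · subst hik; simp [h]
    · simp [hik]

-- B's membership test at index i reads the same bit
lemma tb_shiftRight (a : Int) (i k : Nat) : (a >>> i).testBit k = a.testBit (i + k) := by
  cases a with
  | ofNat m =>
    show (m >>> i).testBit k = m.testBit (i + k)
    exact Nat.testBit_shiftRight m
  | negSucc m =>
    show (!(m >>> i).testBit k) = !m.testBit (i + k)
    rw [Nat.testBit_shiftRight m]

lemma tb_one (k : Nat) : (1 : Int).testBit k = decide (0 = k) := by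
  rw [show (1 : Int) = 2 ^ 0 from rfl, tb_two_pow]

lemma condB_iff (cb : Int) (i : Nat) :
    (PySem.Int.band (cb >>> i) 1 = 1) ↔ cb.testBit i = true := by
  constructor
  · intro h
    have := congrArg (fun x => x.testBit 0) h
    simp only [tb_band, tb_one] at this
    rw [tb_shiftRight] at this
    simpa using this
  · intro h
    apply int_bit_ext
    intro k
    rw [tb_band, tb_one, tb_shiftRight]
    by_cases hk : 0 = k
    · subst hk; simpa using h
    · simp [hk]

-- A's loop folds OR over exactly B's selected list
lemma aloop_eq_fold (cb : Int) (sb : List Int) : ∀ (i : Nat) (t : Int),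
    aloop cb sb i t = (bsel cb sb i).foldl (fun a s => PySem.Int.bor a s) t := by
  induction sb with
  | nil => intro i t; rfl
  | cons s r ih =>
    intro i t
    show aloop cb r (i + 1) _ = (if PySem.Int.band (cb >>> i) 1 = 1
        then s :: bsel cb r (i + 1) else bsel cb r (i + 1)).foldl _ t
    by_cases hc : cb.testBit i = true
    · rw [if_pos ((condB_iff cb i).mpr hc), if_pos ((condA_iff cb i).mpr hc)]
      exact ih (i + 1) (PySem.Int.bor t s)
    · rw [if_neg fun h => hc ((condB_iff cb i).mp h),
        if_neg fun h => hc ((condA_iff cb i).mp h)]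
      exact ih (i + 1) t

-- pulling the accumulator out of the OR-fold
lemma foldl_bor_acc (S : List Int) : ∀ t : Int,
    S.foldl (fun a s => PySem.Int.bor a s) t
      = PySem.Int.bor t (S.foldl (fun a s => PySem.Int.bor a s) 0) := by
  induction S with
  | nil =>
    intro t
    show t = PySem.Int.bor t 0
    rw [PySem.Int.bor_zero]
  | cons s r ih =>
    intro t
    show r.foldl _ (PySem.Int.bor t s) = PySem.Int.bor t (r.foldl _ (PySem.Int.bor 0 s))
    rw [ih (PySem.Int.bor t s), ih (PySem.Int.bor 0 s)]
    apply int_bit_ext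
    intro k
    simp only [tb_bor, tb_zero]
    cases t.testBit k <;> cases s.testBit k <;>
      cases (r.foldl (fun a s => PySem.Int.bor a s) 0).testBit k <;> rfl

-- B's missing-clearing pass computes max_bit with the union's bits removed
lemma foldl_bandnot (S : List Int) : ∀ m0 : Int,
    S.foldl (fun missing s => PySem.Int.band missing (Int.not s)) m0
      = PySem.Int.band m0 (Int.not (S.foldl (fun a s => PySem.Int.bor a s) 0)) := by
  induction S with
  | nil =>
    intro m0
    show m0 = PySem.Int.band m0 (Int.not 0)
    rw [show Int.not 0 = -1 from rfl, PySem.Int.band_neg_one]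
  | cons s r ih =>
    intro m0
    show r.foldl _ (PySem.Int.band m0 (Int.not s))
      = PySem.Int.band m0 (Int.not (r.foldl (fun a s => PySem.Int.bor a s) (PySem.Int.bor 0 s)))
    rw [ih (PySem.Int.band m0 (Int.not s)), foldl_bor_acc r (PySem.Int.bor 0 s)]
    apply int_bit_ext
    intro k
    simp only [tb_band, tb_not, tb_bor, tb_zero]
    cases m0.testBit k <;> cases s.testBit k <;>
      cases (r.foldl (fun a s => PySem.Int.bor a s) 0).testBit k <;> rfl

-- the subset test: some selected skill owns a bit outside max_bit iff the union does
lemma any_iff (S : List Int) (mb : Int) :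
    (S.any (fun s => PySem.Int.band s (Int.not mb) != 0)) = true
      ↔ PySem.Int.band (S.foldl (fun a s => PySem.Int.bor a s) 0) (Int.not mb) ≠ 0 := by
  induction S with
  | nil =>
    constructor
    · intro h; exact absurd h (by simp)
    · intro h
      exfalso
      apply h
      show PySem.Int.band 0 (Int.not mb) = 0
      rw [PySem.Int.band_comm, PySem.Int.band_zero]
  | cons s r ih =>
    have hsplit : PySem.Int.band (List.foldl (fun a s => PySem.Int.bor a s) 0 (s :: r)) (Int.not mb) = 0
        ↔ (PySem.Int.band s (Int.not mb) = 0
            ∧ PySem.Int.band (r.foldl (fun a s => PySem.Int.bor a s) 0) (Int.not mb) = 0) := by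
      rw [show List.foldl (fun a s => PySem.Int.bor a s) 0 (s :: r)
          = r.foldl (fun a s => PySem.Int.bor a s) (PySem.Int.bor 0 s) from rfl,
        foldl_bor_acc r (PySem.Int.bor 0 s)]
      rw [int_eq_zero_iff_tb, int_eq_zero_iff_tb, int_eq_zero_iff_tb, ← forall_and]
      apply forall_congr'
      intro k
      simp only [tb_band, tb_not, tb_bor, tb_zero]
      cases s.testBit k <;> cases mb.testBit k <;>
        cases (r.foldl (fun a s => PySem.Int.bor a s) 0).testBit k <;> simp
    constructor
    · intro h h0
      rw [hsplit] at h0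
      rcases List.any_eq_true.mp h with ⟨x, hx, hpx⟩
      rcases List.mem_cons.mp hx with rfl | hxr
      · exact (by simpa using hpx : PySem.Int.band x (Int.not mb) ≠ 0) h0.1
      · exact (ih.mp (List.any_eq_true.mpr ⟨x, hxr, hpx⟩)) h0.2
    · intro h
      by_cases hs : PySem.Int.band s (Int.not mb) = 0
      · have hr : PySem.Int.band (r.foldl (fun a s => PySem.Int.bor a s) 0) (Int.not mb) ≠ 0 := by
          intro h0
          exact h (hsplit.mpr ⟨hs, h0⟩)
        rcases List.any_eq_true.mp (ih.mpr hr) with ⟨x, hx, hpx⟩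
        exact List.any_eq_true.mpr ⟨x, List.mem_cons_of_mem s hx, hpx⟩
      · exact List.any_eq_true.mpr ⟨s, List.mem_cons_self .., by simpa using hs⟩

-- mutual inclusion is equality
lemma eq_iff_incl (T mb : Int) (hsub : PySem.Int.band T (Int.not mb) = 0) :
    T = mb ↔ PySem.Int.band mb (Int.not T) = 0 := by
  constructor
  · intro h
    subst h
    apply int_bit_ext
    intro k
    simp only [tb_band, tb_not, tb_zero]
    cases T.testBit k <;> rfl
  · intro h
    apply int_bit_ext
    intro k
    have h1 := (int_eq_zero_iff_tb _).mp hsub k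
    have h2 := (int_eq_zero_iff_tb _).mp h k
    simp only [tb_band, tb_not] at h1 h2
    cases hT : T.testBit k <;> cases hm : mb.testBit k <;> simp_all

-- assembling B's staged passes against the union-compare
lemma key_iff (S : List Int) (mb : Int) :
    decide (S.foldl (fun a s => PySem.Int.bor a s) 0 = mb)
      = if S.any (fun s => PySem.Int.band s (Int.not mb) != 0) then false
        else decide (S.foldl (fun missing s => PySem.Int.band missing (Int.not s)) mb = 0) := by
  by_cases hany : (S.any (fun s => PySem.Int.band s (Int.not mb) != 0)) = true
  · rw [if_pos hany]
    have hne := (any_iff S mb).mp hany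
    refine decide_eq_false fun hTmb => hne ?_
    rw [hTmb]
    apply int_bit_ext
    intro k
    simp only [tb_band, tb_not, tb_zero]
    cases mb.testBit k <;> rfl
  · rw [if_neg hany]
    have hsub : PySem.Int.band (S.foldl (fun a s => PySem.Int.bor a s) 0) (Int.not mb) = 0 := by
      by_contra h
      exact hany ((any_iff S mb).mpr h)
    rw [foldl_bandnot S mb]
    exact decide_eq_decide.mpr (eq_iff_incl _ mb hsub)

-- ===== VERDICT (by name: the statement is the Claim_ definition above) =====
theorem is_sufficient_spec : Claim_equal_is_sufficient := by
  intro sb cb mb _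
  unfold Spec_is_sufficient is_sufficient is_sufficient_alt
  rw [aloop_eq_fold cb sb 0 0]
  exact key_iff (bsel cb sb 0) mb
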